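-- pv_equiv track=rewrite | github.com/Ayesha86527/KisanDost-Backend | voice.py | _clean_local_punctuation
-- ===== SOURCE A (Python) =====
-- def _clean_local_punctuation(text: str, lang: str) -> str:
--     if not text:
--         return ""
--     if lang in ("ur", "sd"):
--         replacements = {",": "،", ".": "۔", "?": "؟", "!": "!"}
--         for eng, loc in replacements.items():
--             text = text.replace(eng, loc)
--     return text.strip()
-- ===== SOURCE B (Python) =====
-- def _clean_local_punctuation(text: str, lang: str) -> str:
--     if not text:
--         return ""
--     if lang in ("ur", "sd"):
--         mapping = {",": "\u060c", ".": "\u06d4", "?": "\u061f", "!": "!"}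
--         out = []
--         for ch in text:
--             out.append(mapping.get(ch, ch))
--         text = "".join(out)
--     return text.strip()
-- ===== Notes on version B (the rewrite author's own statement) =====
-- stated objective: alternative
-- what changed: Replaces A's four sequential full-string .replace scans (each rebuilding the string) with a single left-to-right pass that appends mapping.get(ch, ch) per character into one buffer and joins once.
import Mathlib
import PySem

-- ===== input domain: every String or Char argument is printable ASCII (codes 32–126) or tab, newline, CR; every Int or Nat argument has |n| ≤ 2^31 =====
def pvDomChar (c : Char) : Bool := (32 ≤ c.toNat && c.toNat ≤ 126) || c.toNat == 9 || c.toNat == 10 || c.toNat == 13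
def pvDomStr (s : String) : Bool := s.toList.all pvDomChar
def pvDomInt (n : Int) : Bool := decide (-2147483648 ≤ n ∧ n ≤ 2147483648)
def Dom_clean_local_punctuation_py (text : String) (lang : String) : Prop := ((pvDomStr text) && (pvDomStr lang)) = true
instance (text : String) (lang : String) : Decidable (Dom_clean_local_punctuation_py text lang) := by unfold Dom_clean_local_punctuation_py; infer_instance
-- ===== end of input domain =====

-- B replaces A's four sequential full-string .replace scans with one left-to-right
-- pass that maps each character through the dict and joins once (objective: alternative).

-- ===== PORT A =====
-- A: guard, then four sequential replace passes (insertion order of the dict), then strip.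
def clean_local_punctuation_py (text : String) (lang : String) : String :=
  if text = "" then ""
  else
    let text :=
      if lang = "ur" ∨ lang = "sd" then
        let t1 := PySem.Str.replace text "," "،"
        let t2 := PySem.Str.replace t1 "." "۔"
        let t3 := PySem.Str.replace t2 "?" "؟"
        PySem.Str.replace t3 "!" "!"
      else text
    PySem.Str.strip text

-- ===== PORT B =====
-- mapping.get(ch, ch) of Source B: the dict lookup with the character itself as default
def pvMapGet (c : Char) : String :=
  if c = ',' then "،"
  else if c = '.' then "۔"
  else if c = '?' then "؟"
  else if c = '!' then "!"
  else String.ofList [c]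

-- B: guard, then one pass appending pvMapGet ch per character, one join, then strip.
def clean_local_punctuation_py_alt (text : String) (lang : String) : String :=
  if text = "" then ""
  else
    let text :=
      if lang = "ur" ∨ lang = "sd" then
        let out := text.toList.foldl (fun acc ch => acc ++ [pvMapGet ch]) ([] : List String)
        PySem.Str.join "" out
      else text
    PySem.Str.strip text

-- ===== PRECONDITION & SPEC =====
def Spec_clean_local_punctuation_py (text : String) (lang : String) (out : String) : Prop := out = clean_local_punctuation_py_alt text lang
instance (text : String) (lang : String) (out : String) : Decidable (Spec_clean_local_punctuation_py text lang out) := by unfold Spec_clean_local_punctuation_py; infer_instance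

-- ===== CLAIM (what is proved, stated in full; the proofs are below) =====
def Claim_equal_clean_local_punctuation_py : Prop := ∀ (text : String) (lang : String), Dom_clean_local_punctuation_py text lang → Spec_clean_local_punctuation_py text lang (clean_local_punctuation_py text lang)

-- ===== LEMMAS AND PROOFS =====

-- single-character replace is a per-character flatMap (the worker, by list induction)
lemma go_single (o : Char) (ns : List Char) :
    ∀ (l acc : List Char) (fuel : Nat), l.length ≤ fuel →
      PySem.Chars.replace.go [o] ns fuel l acc
        = acc.reverse ++ l.flatMap (fun c => if c = o then ns else [c]) := by
  intro l
  induction l with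
  | nil =>
      intro acc fuel _
      cases fuel <;> simp [PySem.Chars.replace.go]
  | cons c t ih =>
      intro acc fuel hf
      cases fuel with
      | zero => simp at hf
      | succ fuel =>
        have hf' : t.length ≤ fuel := by simpa using hf
        by_cases h : c = o
        · subst h
          simp [PySem.Chars.replace.go, List.isPrefixOf, ih _ _ hf']
        · have hne : (o == c) = false := by
            simp; exact fun he => h he.symm
          simp [PySem.Chars.replace.go, List.isPrefixOf, hne, ih _ _ hf', h]

lemma replace_single (s : List Char) (o : Char) (ns : List Char) :
    PySem.Chars.replace s [o] ns = s.flatMap (fun c => if c = o then ns else [c]) := by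
  rw [PySem.Chars.replace]
  simp [go_single o ns s [] s.length (le_refl _)]

-- composing the four per-character substitutions gives the single-pass map of B
lemma compose_char (c : Char) :
    List.flatMap (fun x =>
        List.flatMap (fun x =>
            List.flatMap (fun d => if d = '!' then ['!'] else [d])
              (if x = '?' then ("؟" : String).toList else [x]))
          (if x = '.' then ("۔" : String).toList else [x]))
      (if c = ',' then ("،" : String).toList else [c])
      = (pvMapGet c).toList := by
  by_cases h1 : c = ','
  · subst h1; decide
  · by_cases h2 : c = '.'
    · subst h2; decide
    · by_cases h3 : c = '?'
      · subst h3; decide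
      · by_cases h4 : c = '!'
        · subst h4; decide
        · simp [pvMapGet, h1, h2, h3, h4]

-- "".join(parts) with empty separator is flatten
lemma join_empty (ps : List (List Char)) : PySem.Chars.join [] ps = ps.flatten := by
  induction ps with
  | nil => simp [PySem.Chars.join_nil]
  | cons p rest ih =>
      cases rest with
      | nil => simp [PySem.Chars.join_singleton]
      | cons q r => simp [PySem.Chars.join_cons_cons, ih]

-- on the ur/sd branch the two pre-strip strings coincide
lemma chain_eq (text : String) :
    PySem.Str.replace (PySem.Str.replace (PySem.Str.replace (PySem.Str.replace text "," "،") "." "۔") "?" "؟") "!" "!"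
      = PySem.Str.join "" (text.toList.foldl (fun acc ch => acc ++ [pvMapGet ch]) ([] : List String)) := by
  apply String.toList_injective
  rw [PySem.List.foldl_append_singleton_eq_map]
  simp only [PySem.Str.toList_replace, PySem.Str.toList_join]
  rw [show ("," : String).toList = [','] from rfl,
      show ("." : String).toList = ['.'] from rfl,
      show ("?" : String).toList = ['?'] from rfl,
      show ("!" : String).toList = ['!'] from rfl]
  rw [replace_single, replace_single, replace_single, replace_single]
  rw [List.flatMap_assoc, List.flatMap_assoc, List.flatMap_assoc]
  rw [show ("" : String).toList = ([] : List Char) from rfl, join_empty,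
      List.nil_append, List.map_map, List.flatten_eq_flatMap, List.flatMap_map]
  exact List.flatMap_congr (fun c _ => compose_char c)

-- ===== VERDICT (by name: the statement is the Claim_ definition above) =====
theorem clean_local_punctuation_py_spec : Claim_equal_clean_local_punctuation_py := by
  intro text lang _
  unfold Spec_clean_local_punctuation_py clean_local_punctuation_py clean_local_punctuation_py_alt
  by_cases h0 : text = ""
  · simp [h0]
  · simp only [h0, if_false]
    by_cases hl : lang = "ur" ∨ lang = "sd"
    · simp [hl, chain_eq]
    · simp [hl]
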